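-- pv_equiv track=rewrite | github.com/JasonPiszcyk/AppDataStore | src/appdatastore/base.py | _check_dot_name
-- ===== SOURCE A (Python) =====
-- def _check_dot_name(
--
--         keys: list = [],
--         name: str = ""
-- ) -> bool:
--     '''
--     Check the name to ensure a value isn't going to be stored in a
--     sub-level name
--
--     Args:
--         keys (list): A list of keys in the datastore
--         name (str): The name to check
--
--     Returns:
--         bool: True if the name is OK, False otherwise
--
--     Raises:
--         None
--     '''
--     assert isinstance(keys, list), "Keys must be a list of key names"
--     assert name, "A name is required to check"
--
--     # Go through the whole list looking for the name
--     for _key in sorted(keys):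
--         if name == _key: continue
--
--         # Look for a name trying to add a branch where a value is stored
--         if str(name).find(f"{_key}.") == 0:
--             return False
--
--         # Look for a name trying to add a value where a branch is
--         if str(_key).find(f"{name}.") == 0:
--             return False
--
--     return True
-- ===== SOURCE B (Python) =====
-- def _check_dot_name(
--         keys: list = [],
--         name: str = ""
-- ) -> bool:
--     '''
--     Check the name to ensure a value isn't going to be stored in a
--     sub-level name (prefix-index re-implementation).
--     '''
--     assert isinstance(keys, list), "Keys must be a list of key names"
--     assert name, "A name is required to check"
--
--     # Index every dotted ancestor prefix of every key: key[:i] for each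
--     # position i where key[i] == '.'
--     ancestors = set()
--     for key in keys:
--         k = str(key)
--         for i, ch in enumerate(k):
--             if ch == '.':
--                 ancestors.add(k[:i])
--
--     # name is an ancestor of some key -> a value would shadow a branch
--     if str(name) in ancestors:
--         return False
--
--     # some key is an ancestor of name -> a branch would shadow a value
--     key_set = {str(key) for key in keys}
--     n = str(name)
--     for i, ch in enumerate(n):
--         if ch == '.' and n[:i] in key_set:
--             return False
--
--     return True
-- ===== Notes on version B (the rewrite author's own statement) =====
-- stated objective: faster
-- what changed: Replaces A's sort plus per-key startswith/find substring scan by a hash set of every dotted ancestor prefix of the keys built in one pass, then membership tests for name and for name's own dotted prefixes; the sort and the quadratic substring search disappear.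
import Mathlib
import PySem

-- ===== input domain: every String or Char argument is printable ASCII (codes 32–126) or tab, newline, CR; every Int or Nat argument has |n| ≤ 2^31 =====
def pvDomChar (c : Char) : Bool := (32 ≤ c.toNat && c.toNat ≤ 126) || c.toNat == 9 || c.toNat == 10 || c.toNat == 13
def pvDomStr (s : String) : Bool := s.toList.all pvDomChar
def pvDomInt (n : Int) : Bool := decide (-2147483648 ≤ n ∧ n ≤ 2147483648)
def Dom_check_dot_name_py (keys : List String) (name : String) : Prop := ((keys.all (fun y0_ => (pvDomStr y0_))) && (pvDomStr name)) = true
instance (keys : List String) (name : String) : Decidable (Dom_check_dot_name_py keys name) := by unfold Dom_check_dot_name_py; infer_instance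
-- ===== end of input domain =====

-- B replaces A's per-key startswith/find scan over sorted(keys) by a set of all dotted
-- ancestor prefixes of the keys built once, then set lookups (measured faster on large inputs).

-- ===== PORT A =====
-- the 'for _key in sorted(keys): …' loop with its early returns; str(name)/str(_key) on str
-- arguments are identities; f"{_key}." is k ++ ['.'] on the character lists
def pvLoopA (name : List Char) : List (List Char) → Bool
  | [] => true
  | k :: rest =>
    if name = k then pvLoopA name rest
    else if PySem.Chars.find name (k ++ ['.']) = 0 then false
    else if PySem.Chars.find k (name ++ ['.']) = 0 then false
    else pvLoopA name rest

def check_dot_name_py (keys : List String) (name : String) : Bool :=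
  pvLoopA name.toList ((PySem.List.sorted keys (fun x => x) false).map String.toList)

-- ===== PORT B =====
-- 'for i, ch in enumerate(k): if ch == '.': ancestors.add(k[:i])'; the enumerate index is
-- nonnegative, so the slice k[:i] is exactly List.take i
def pvAncAdd (k : List Char) (s : PySem.Set (List Char)) : PySem.Set (List Char) :=
  (PySem.List.enumerate k 0).foldl
    (fun s ic => if ic.2 = '.' then s.add (k.take ic.1.toNat) else s) s

def pvAncestors (keys : List (List Char)) : PySem.Set (List Char) :=
  keys.foldl (fun s k => pvAncAdd k s) (PySem.Set.ofList [])

-- the final 'for i, ch in enumerate(n): …' loop with its early return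
def pvLoopB (n : List Char) (keySet : PySem.Set (List Char)) : List (Int × Char) → Bool
  | [] => true
  | ic :: rest =>
    if ic.2 = '.' ∧ n.take ic.1.toNat ∈ keySet then false
    else pvLoopB n keySet rest

def check_dot_name_py_alt (keys : List String) (name : String) : Bool :=
  let ks := keys.map String.toList
  if name.toList ∈ pvAncestors ks then false
  else pvLoopB name.toList (PySem.Set.ofList ks) (PySem.List.enumerate name.toList 0)

-- ===== PRECONDITION & SPEC =====
-- Python A's 'assert name' raises AssertionError on the empty name; B asserts identically.
def Pre_check_dot_name_py (keys : List String) (name : String) : Prop := name ≠ ""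
instance (keys : List String) (name : String) : Decidable (Pre_check_dot_name_py keys name) := by unfold Pre_check_dot_name_py; infer_instance
def pvWitness_check_dot_name_py : List String × String := (["a.b", "c"], "a")

def Spec_check_dot_name_py (keys : List String) (name : String) (out : Bool) : Prop := out = check_dot_name_py_alt keys name
instance (keys : List String) (name : String) (out : Bool) : Decidable (Spec_check_dot_name_py keys name out) := by unfold Spec_check_dot_name_py; infer_instance

-- ===== CLAIM (what is proved, stated in full; the proofs are below) =====
def Claim_equal_check_dot_name_py : Prop := ∀ (keys : List String) (name : String), Dom_check_dot_name_py keys name → Pre_check_dot_name_py keys name → Spec_check_dot_name_py keys name (check_dot_name_py keys name)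

-- ===== LEMMAS AND PROOFS =====

-- s.find(sub) == 0 is exactly 'sub is a prefix of s'
theorem pv_find_eq_zero_iff (s sub : List Char) :
    PySem.Chars.find s sub = 0 ↔ sub <+: s := by
  constructor
  · intro h
    have h0 : (0 : Int) ≤ PySem.Chars.find s sub := by omega
    have := (PySem.Chars.find_spec h0).1
    simpa [h] using this
  · intro hp
    have h0 : (0 : Int) ≤ PySem.Chars.find s sub :=
      (PySem.Chars.find_nonneg_iff s sub).mpr hp.isInfix
    rcases lt_or_eq_of_le h0 with hlt | heq
    · exfalso
      have := (PySem.Chars.find_spec h0).2 0 (by omega)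
      exact this (by simpa using hp)
    · omega

theorem pv_not_dot_prefix_self (s : List Char) : ¬ (s ++ ['.'] <+: s) := by
  intro h
  have := h.length_le
  simp at this

-- 't.' is a prefix of s  ↔  some position i of s holds '.' with s[:i] = t
theorem pv_dot_prefix_iff (t s : List Char) :
    t ++ ['.'] <+: s ↔ ∃ i, ∃ h : i < s.length, s[i] = '.' ∧ t = s.take i := by
  constructor
  · rintro ⟨r, hr⟩
    refine ⟨t.length, ?_, ?_, ?_⟩ <;> subst hr <;> simp
  · rintro ⟨i, h, hc, ht⟩
    refine ⟨s.drop (i + 1), ?_⟩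
    subst ht
    rw [List.append_assoc]
    nth_rewrite 3 [← List.take_append_drop i s]
    congr 1
    rw [List.drop_eq_getElem_cons h, hc]
    rfl

theorem pv_loopA_iff (name : List Char) (l : List (List Char)) :
    pvLoopA name l = true ↔
      ∀ k ∈ l, ¬ (k ++ ['.'] <+: name) ∧ ¬ (name ++ ['.'] <+: k) := by
  induction l with
  | nil => simp [pvLoopA]
  | cons k rest ih =>
    unfold pvLoopA
    split_ifs with h0 h1 h2
    · subst h0
      rw [ih]
      constructor
      · intro h x hx
        rcases List.mem_cons.mp hx with rfl | hx
        · exact ⟨pv_not_dot_prefix_self _, pv_not_dot_prefix_self _⟩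
        · exact h x hx
      · intro h x hx; exact h x (List.mem_cons.mpr (Or.inr hx))
    · exact iff_of_false (by simp)
        (fun h => (h k List.mem_cons_self).1 ((pv_find_eq_zero_iff _ _).mp h1))
    · exact iff_of_false (by simp)
        (fun h => (h k List.mem_cons_self).2 ((pv_find_eq_zero_iff _ _).mp h2))
    · rw [ih]
      constructor
      · intro h x hx
        rcases List.mem_cons.mp hx with rfl | hx
        · exact ⟨fun hp => h1 ((pv_find_eq_zero_iff _ _).mpr hp),
                 fun hp => h2 ((pv_find_eq_zero_iff _ _).mpr hp)⟩
        · exact h x hx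
      · intro h x hx; exact h x (List.mem_cons.mpr (Or.inr hx))

theorem pv_mem_ancAdd (k : List Char) (s : PySem.Set (List Char)) (x : List Char) :
    x ∈ pvAncAdd k s ↔ x ∈ s ∨ x ++ ['.'] <+: k := by
  have gen : ∀ (l : List (Int × Char)) (s : PySem.Set (List Char)),
      x ∈ l.foldl (fun s ic => if ic.2 = '.' then s.add (k.take ic.1.toNat) else s) s ↔
        x ∈ s ∨ ∃ ic ∈ l, ic.2 = '.' ∧ x = k.take ic.1.toNat := by
    intro l
    induction l with
    | nil => simp
    | cons ic rest ih =>
      intro s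
      by_cases hc : ic.2 = '.'
      · simp only [List.foldl_cons, if_pos hc, ih, PySem.Set.mem_add, List.mem_cons]
        constructor
        · rintro ((h | hx) | ⟨p, hp, hpc, hx⟩)
          · exact Or.inl h
          · exact Or.inr ⟨ic, Or.inl rfl, hc, hx⟩
          · exact Or.inr ⟨p, Or.inr hp, hpc, hx⟩
        · rintro (h | ⟨p, hp | hp, hpc, hx⟩)
          · exact Or.inl (Or.inl h)
          · subst hp; exact Or.inl (Or.inr hx)
          · exact Or.inr ⟨p, hp, hpc, hx⟩
      · simp only [List.foldl_cons, if_neg hc, ih, List.mem_cons]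
        constructor
        · rintro (h | ⟨p, hp, hpc, hx⟩)
          · exact Or.inl h
          · exact Or.inr ⟨p, Or.inr hp, hpc, hx⟩
        · rintro (h | ⟨p, hp | hp, hpc, hx⟩)
          · exact Or.inl h
          · exact absurd (hp ▸ hpc) hc
          · exact Or.inr ⟨p, hp, hpc, hx⟩
  rw [pvAncAdd, gen]
  rw [pv_dot_prefix_iff]
  constructor
  · rintro (h | ⟨ic, hmem, hc, rfl⟩)
    · exact Or.inl h
    · rcases (PySem.List.mem_enumerate_iff k 0 ic).mp hmem with ⟨j, hj, rfl⟩
      exact Or.inr ⟨j, hj, by simpa using hc, by simp⟩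
  · rintro (h | ⟨i, hi, hc, rfl⟩)
    · exact Or.inl h
    · refine Or.inr ⟨((0 : Int) + i, k[i]), ?_, hc, by simp⟩
      exact (PySem.List.mem_enumerate_iff k 0 _).mpr ⟨i, hi, rfl⟩

theorem pv_mem_ancestors (ks : List (List Char)) (x : List Char) :
    x ∈ pvAncestors ks ↔ ∃ k ∈ ks, x ++ ['.'] <+: k := by
  have gen : ∀ (l : List (List Char)) (s : PySem.Set (List Char)),
      x ∈ l.foldl (fun s k => pvAncAdd k s) s ↔ x ∈ s ∨ ∃ k ∈ l, x ++ ['.'] <+: k := by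
    intro l
    induction l with
    | nil => simp
    | cons k rest ih =>
      intro s
      simp only [List.foldl_cons, ih, pv_mem_ancAdd, List.mem_cons]
      constructor
      · rintro ((h | h) | ⟨p, hp, hx⟩)
        · exact Or.inl h
        · exact Or.inr ⟨k, Or.inl rfl, h⟩
        · exact Or.inr ⟨p, Or.inr hp, hx⟩
      · rintro (h | ⟨p, hp | hp, hx⟩)
        · exact Or.inl (Or.inl h)
        · subst hp; exact Or.inl (Or.inr hx)
        · exact Or.inr ⟨p, hp, hx⟩
  rw [pvAncestors, gen]
  simp

theorem pv_loopB_iff (n : List Char) (keySet : PySem.Set (List Char)) (l : List (Int × Char)) :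
    pvLoopB n keySet l = true ↔ ∀ ic ∈ l, ¬ (ic.2 = '.' ∧ n.take ic.1.toNat ∈ keySet) := by
  induction l with
  | nil => simp [pvLoopB]
  | cons ic rest ih =>
    unfold pvLoopB
    split_ifs with hc
    · exact iff_of_false (by simp) (fun h => h ic List.mem_cons_self hc)
    · rw [ih]
      constructor
      · intro h x hx
        rcases List.mem_cons.mp hx with rfl | hx
        · exact hc
        · exact h x hx
      · intro h x hx; exact h x (List.mem_cons.mpr (Or.inr hx))

-- B = true  ↔  no key is a dotted ancestor of name and name is no dotted ancestor of a key
theorem pv_alt_iff (keys : List String) (name : String) :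
    check_dot_name_py_alt keys name = true ↔
      ∀ k ∈ keys.map String.toList,
        ¬ (k ++ ['.'] <+: name.toList) ∧ ¬ (name.toList ++ ['.'] <+: k) := by
  unfold check_dot_name_py_alt
  by_cases hm : name.toList ∈ pvAncestors (keys.map String.toList)
  · simp only [if_pos hm]
    rcases (pv_mem_ancestors _ _).mp hm with ⟨k, hk, hpre⟩
    exact iff_of_false (by simp) (fun h => (h k hk).2 hpre)
  · simp only [if_neg hm, pv_loopB_iff]
    rw [pv_mem_ancestors] at hm
    push Not at hm
    constructor
    · intro h k hk
      refine ⟨?_, hm k hk⟩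
      intro hpre
      rcases (pv_dot_prefix_iff _ _).mp hpre with ⟨i, hi, hc, ht⟩
      refine h ((0 : Int) + i, name.toList[i])
        ((PySem.List.mem_enumerate_iff _ 0 _).mpr ⟨i, hi, rfl⟩) ⟨by simpa using hc, ?_⟩
      rw [PySem.Set.mem_ofList]
      simp only [Int.zero_add, Int.toNat_natCast, ← ht]
      exact hk
    · intro h ic hmem ⟨hc, hks⟩
      rcases (PySem.List.mem_enumerate_iff _ 0 ic).mp hmem with ⟨j, hj, rfl⟩
      rw [PySem.Set.mem_ofList] at hks
      simp only [Int.zero_add, Int.toNat_natCast] at hks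
      refine (h _ hks).1 ?_
      exact (pv_dot_prefix_iff _ _).mpr ⟨j, hj, by simpa using hc, rfl⟩

-- ===== VERDICT (by name: the statement is the Claim_ definition above) =====
theorem check_dot_name_py_spec : Claim_equal_check_dot_name_py := by
  intro keys name _ _
  unfold Spec_check_dot_name_py
  have hA : check_dot_name_py keys name = true ↔
      ∀ k ∈ keys.map String.toList,
        ¬ (k ++ ['.'] <+: name.toList) ∧ ¬ (name.toList ++ ['.'] <+: k) := by
    rw [check_dot_name_py, pv_loopA_iff]
    constructor
    · intro h k hk
      rcases List.mem_map.mp hk with ⟨key, hkey, rfl⟩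
      exact h _ (List.mem_map.mpr ⟨key, (PySem.List.mem_sorted keys _ false key).mpr hkey, rfl⟩)
    · intro h k hk
      rcases List.mem_map.mp hk with ⟨key, hkey, rfl⟩
      exact h _ (List.mem_map.mpr ⟨key, (PySem.List.mem_sorted keys _ false key).mp hkey, rfl⟩)
  rw [← pv_alt_iff] at hA
  cases hB : check_dot_name_py_alt keys name
  · cases hA' : check_dot_name_py keys name
    · rfl
    · exact absurd (hB ▸ hA.mp hA') (by simp)
  · exact hA.mpr hB
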